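-- pv_equiv track=rewrite | github.com/FanchenBao/leetcode | LeetCode_2645.py | addMinimum
-- ===== SOURCE A (Python) =====
-- def addMinimum(word: str) -> int:
--     """Greedy. Try for form "abc" as eagerly as possible. Only three
--     two-letter combinations might produce interesting result: ab, ac, and bc
--     For ab, we have to check if abc is possible. Otherwise, we add one
--     letter. For both ac and bc, we add one letter.
--
--     For all other two-letter or one-letter combinations, we always have to
--     add two letter with regard to the first letter.
--
--     O(N), 48 ms, faster than 44.77%
--     """
--     i = 0
--     N = len(word)
--     res = 0
--     while i < N:
--         w = word[i:i + 2]
--         if w == 'ab':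
--             if i + 2 < N and word[i + 2] == 'c':
--                 i += 3
--             else:
--                 res += 1
--                 i += 2
--         elif w == 'ac' or w == 'bc':
--             res += 1
--             i += 2
--         else:
--             res += 2
--             i += 1
--     return res
-- ===== SOURCE B (Python) =====
-- def addMinimum(word: str) -> int:
--     """One pass: count the starts of the greedy scanner's chunks (position i
--     starts a chunk unless its letter extends 'a'->'b', 'a'->'c' or 'b'->'c'
--     from the previous letter), then the insertions needed are 3*groups - len(word)."""
--     groups = 0
--     prev = ''
--     for ch in word:
--         if not ((ch == 'b' and prev == 'a') or (ch == 'c' and (prev == 'a' or prev == 'b'))):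
--             groups += 1
--         prev = ch
--     return 3 * groups - len(word)
-- ===== Notes on version B (the rewrite author's own statement) =====
-- stated objective: simpler
-- what changed: Replaces A's greedy variable-width scan (five branches consuming 1-3 characters via string slicing and a lookahead) by a single uniform one-character-at-a-time pass that counts chunk starts (a position extends the chunk only on a->b, a->c or b->c transitions) and returns the closed form 3*groups - len(word).
import Mathlib
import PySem

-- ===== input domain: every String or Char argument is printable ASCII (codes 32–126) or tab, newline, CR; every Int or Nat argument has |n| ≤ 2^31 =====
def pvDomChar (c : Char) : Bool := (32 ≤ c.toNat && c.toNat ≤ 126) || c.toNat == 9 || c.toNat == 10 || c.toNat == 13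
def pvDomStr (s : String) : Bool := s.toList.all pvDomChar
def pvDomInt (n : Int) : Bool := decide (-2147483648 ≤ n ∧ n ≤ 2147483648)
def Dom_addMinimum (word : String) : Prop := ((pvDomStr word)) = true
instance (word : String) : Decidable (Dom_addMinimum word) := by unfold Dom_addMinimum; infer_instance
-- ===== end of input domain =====

-- B replaces A's multi-width greedy scan by a one-pass group count with the closed form 3*groups - len (objective: simpler).

-- ===== PORT A =====
-- A's while loop scans the suffix word[i:]; each branch of the loop body is one arm,
-- consuming the same number of characters and adding the same amount to res.
def addMinimumGoA : List Char → Int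
  | 'a' :: 'b' :: 'c' :: rest => addMinimumGoA rest
  | 'a' :: 'b' :: rest => 1 + addMinimumGoA rest
  | 'a' :: 'c' :: rest => 1 + addMinimumGoA rest
  | 'b' :: 'c' :: rest => 1 + addMinimumGoA rest
  | _ :: rest => 2 + addMinimumGoA rest
  | [] => 0

def addMinimum (word : String) : Int := addMinimumGoA word.toList

-- ===== PORT B =====
-- B's single for-loop: state (groups, prev); prev = '' before the loop is ported as none.
-- A position extends the current chunk iff ch='b' after 'a', or ch='c' after 'a' or 'b'; else it starts one.
def addMinimum_alt (word : String) : Int :=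
  let st := word.toList.foldl
    (fun (st : Int × Option Char) ch =>
      (if (ch = 'b' ∧ st.2 = some 'a') ∨ (ch = 'c' ∧ (st.2 = some 'a' ∨ st.2 = some 'b'))
       then st.1 else st.1 + 1, some ch))
    (0, none)
  3 * st.1 - (word.toList.length : Int)

-- ===== PRECONDITION & SPEC =====
def Spec_addMinimum (word : String) (out : Int) : Prop := out = addMinimum_alt word
instance (word : String) (out : Int) : Decidable (Spec_addMinimum word out) := by unfold Spec_addMinimum; infer_instance

-- ===== CLAIM (what is proved, stated in full; the proofs are below) =====
def Claim_equal_addMinimum : Prop := ∀ (word : String), Dom_addMinimum word → Spec_addMinimum word (addMinimum word)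

-- ===== LEMMAS AND PROOFS =====

-- B's group count, structurally (prev as Option Char)
def pvG : Option Char → List Char → Int
  | _, [] => 0
  | p, c :: r =>
    (if (c = 'b' ∧ p = some 'a') ∨ (c = 'c' ∧ (p = some 'a' ∨ p = some 'b')) then 0 else 1) + pvG (some c) r

lemma pvFoldl_fst (cs : List Char) : ∀ (g : Int) (p : Option Char),
    (cs.foldl
      (fun (st : Int × Option Char) ch =>
        (if (ch = 'b' ∧ st.2 = some 'a') ∨ (ch = 'c' ∧ (st.2 = some 'a' ∨ st.2 = some 'b'))
         then st.1 else st.1 + 1, some ch))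
      (g, p)).1 = g + pvG p cs := by
  induction cs with
  | nil => intro g p; simp [pvG]
  | cons c t ih =>
    intro g p
    by_cases h : (c = 'b' ∧ p = some 'a') ∨ (c = 'c' ∧ (p = some 'a' ∨ p = some 'b'))
    · simp [List.foldl, pvG, h, ih]
    · simp [List.foldl, pvG, h, ih]; ring

-- prev never extends a chunk when the pair (p, head) is not one of a->b, a->c, b->c
lemma pvG_drop (p : Char) (r : List Char)
    (h : ∀ c, r.head? = some c → ¬ ((c = 'b' ∧ p = 'a') ∨ (c = 'c' ∧ (p = 'a' ∨ p = 'b')))) :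
    pvG (some p) r = pvG none r := by
  cases r with
  | nil => rfl
  | cons c t =>
    have := h c rfl
    simp only [pvG]
    congr 1
    simp [this]

lemma pvGoA_eq : ∀ (cs : List Char), addMinimumGoA cs = 3 * pvG none cs - cs.length := by
  intro cs
  induction cs using addMinimumGoA.induct with
  | case1 rest ih =>
    rw [show addMinimumGoA ('a' :: 'b' :: 'c' :: rest) = addMinimumGoA rest from rfl, ih]
    simp [pvG]
    rw [pvG_drop 'c' rest (by intro c _; simp)]
    omega
  | case2 rest hne ih =>
    rw [addMinimumGoA.eq_2 rest hne, ih]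
    simp [pvG]
    rw [pvG_drop 'b' rest (by
      intro c hc h
      rcases h with ⟨_, hp⟩ | ⟨hc', _⟩
      · exact absurd hp (by decide)
      · subst hc'
        cases rest with
        | nil => simp at hc
        | cons x t => simp at hc; exact hne t (by rw [hc]))]
    omega
  | case3 rest ih =>
    rw [show addMinimumGoA ('a' :: 'c' :: rest) = 1 + addMinimumGoA rest from rfl, ih]
    simp [pvG]
    rw [pvG_drop 'c' rest (by intro c _; simp)]
    omega
  | case4 rest ih =>
    rw [show addMinimumGoA ('b' :: 'c' :: rest) = 1 + addMinimumGoA rest from rfl, ih]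
    simp [pvG]
    rw [pvG_drop 'c' rest (by intro c _; simp)]
    omega
  | case5 head rest h1 h2 h3 h4 ih =>
    rw [addMinimumGoA.eq_5 head rest h1 h2 h3 h4, ih]
    simp [pvG]
    rw [pvG_drop head rest (by
      intro c hc h
      have hrest : ∀ x t, rest = x :: t → c = x := by
        intro x t hxt; rw [hxt] at hc; exact (by simpa using hc : x = c).symm
      cases rest with
      | nil => simp at hc
      | cons x t =>
        have hcx := hrest x t rfl
        subst hcx
        rcases h with ⟨hb, hp⟩ | ⟨hcc, hp | hp⟩
        · exact h2 t hp (by rw [hb])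
        · exact h3 t hp (by rw [hcc])
        · exact h4 t hp (by rw [hcc]))]
    omega
  | case6 =>
    simp [addMinimumGoA, pvG]

-- ===== VERDICT (by name: the statement is the Claim_ definition above) =====
theorem addMinimum_spec : Claim_equal_addMinimum := by
  intro word _
  unfold Spec_addMinimum addMinimum addMinimum_alt
  rw [pvGoA_eq word.toList]
  simp [pvFoldl_fst]
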